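-- pv_equiv track=rewrite | github.com/tac-tac-go/Codewars | Chessboard_legend/Chessboard_legend.py | grains
-- ===== SOURCE A (Python) =====
-- def grains(n):
--     count = 1
--     result = 0
--     for i in range(n):
--         for j in range(n):
--             result += count
--             count*=2
--     return result
-- ===== SOURCE B (Python) =====
-- def grains(n):
--     if n < 0:
--         return 0
--     return (1 << (n * n)) - 1
-- ===== Notes on version B (the rewrite author's own statement) =====
-- stated objective: faster
-- what changed: Replaces the nested n-by-n loop accumulating successive powers of 2 with the closed form 2^(n*n) - 1 computed by one bit shift.
import Mathlib
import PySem

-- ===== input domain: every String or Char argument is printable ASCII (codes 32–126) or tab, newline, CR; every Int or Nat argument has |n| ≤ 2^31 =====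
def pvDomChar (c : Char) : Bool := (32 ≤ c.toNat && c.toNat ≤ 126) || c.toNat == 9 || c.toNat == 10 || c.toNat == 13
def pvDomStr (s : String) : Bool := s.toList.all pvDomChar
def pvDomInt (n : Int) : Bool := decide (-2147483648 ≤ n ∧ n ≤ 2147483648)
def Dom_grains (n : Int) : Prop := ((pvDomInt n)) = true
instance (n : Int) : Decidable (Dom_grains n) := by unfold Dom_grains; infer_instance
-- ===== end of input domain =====

-- B replaces the O(n²) doubling loop by the closed form 2^(n*n) - 1 (one shift): asymptotically faster.

-- ===== PORT A =====
-- nested 'for i in range(n): for j in range(n):' over state (count, result)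
def grains (n : Int) : Int :=
  let s := (PySem.List.pyRange 0 n 1).foldl
    (fun st _ =>
      (PySem.List.pyRange 0 n 1).foldl
        (fun (cr : Int × Int) _ => (cr.1 * 2, cr.2 + cr.1)) st)
    (1, 0)
  s.2

-- ===== PORT B =====
def grains_alt (n : Int) : Int :=
  if n < 0 then 0
  else 2 ^ (n * n).toNat - 1

-- ===== PRECONDITION & SPEC =====
def Spec_grains (n : Int) (out : Int) : Prop := out = grains_alt n
instance (n : Int) (out : Int) : Decidable (Spec_grains n out) := by unfold Spec_grains; infer_instance

-- ===== CLAIM (what is proved, stated in full; the proofs are below) =====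
def Claim_equal_grains : Prop := ∀ (n : Int), Dom_grains n → Spec_grains n (grains n)

-- ===== LEMMAS AND PROOFS =====

-- one pass of the inner body over any list of length m sends (c, r) to (c·2^m, r + c·(2^m − 1))
lemma double_fold (l : List Int) (c r : Int) :
    l.foldl (fun (cr : Int × Int) _ => (cr.1 * 2, cr.2 + cr.1)) (c, r)
      = (c * 2 ^ l.length, r + c * (2 ^ l.length - 1)) := by
  induction l generalizing c r with
  | nil => simp
  | cons x xs ih =>
    simp only [List.foldl_cons, ih, List.length_cons, pow_succ]
    rw [Prod.mk.injEq]; exact ⟨by ring, by ring⟩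

lemma outer_fold (l : List Int) (m : Nat) (c r : Int) :
    l.foldl (fun st _ => (PySem.List.pyRange 0 m 1).foldl
        (fun (cr : Int × Int) _ => (cr.1 * 2, cr.2 + cr.1)) st) (c, r)
      = (c * 2 ^ (m * l.length), r + c * (2 ^ (m * l.length) - 1)) := by
  induction l generalizing c r with
  | nil => simp
  | cons x xs ih =>
    have hlen : (PySem.List.pyRange 0 (m : Int) 1).length = m := by
      simp [PySem.List.length_pyRange_one]
    simp only [List.foldl_cons, double_fold, hlen, ih, List.length_cons]
    have : m * (xs.length + 1) = m + m * xs.length := by ring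
    rw [this, pow_add]
    rw [Prod.mk.injEq]; exact ⟨by ring, by ring⟩

-- ===== VERDICT (by name: the statement is the Claim_ definition above) =====
theorem grains_spec : Claim_equal_grains := by
  intro n _
  unfold Spec_grains grains grains_alt
  by_cases h : n < 0
  · rw [PySem.List.pyRange_one_eq_nil (by omega)]
    simp [h]
  · push Not at h
    obtain ⟨m, rfl⟩ := Int.eq_ofNat_of_zero_le h
    have hlen : (PySem.List.pyRange 0 (m : Int) 1).length = m := by
      simp [PySem.List.length_pyRange_one]
    rw [outer_fold _ m 1 0, hlen]
    have : ((m : Int) * m).toNat = m * m := by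
      simp [Int.toNat_mul]
    simp [this, h.not_gt]
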